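-- pv_equiv track=rewrite | github.com/eordaxd/ai-pocs | pocs/qa-chatbot/src/ingestion/chunker.py | _take_overlap
-- ===== SOURCE A (Python) =====
-- def _take_overlap(sentences: list[str], max_chars: int) -> list[str]:
--     """Return the trailing sentences that fit within max_chars."""
--     result = []
--     chars = 0
--     for sentence in reversed(sentences):
--         if chars + len(sentence) > max_chars:
--             break
--         result.insert(0, sentence)
--         chars += len(sentence)
--     return result
-- ===== SOURCE B (Python) =====
-- def _take_overlap(sentences: list[str], max_chars: int) -> list[str]:
--     """Return the trailing sentences that fit within max_chars."""
--     # running cumulative totals of the suffix lengths (back to front)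
--     totals = []
--     t = 0
--     for s in reversed(sentences):
--         t += len(s)
--         totals.append(t)
--     # totals is nondecreasing, so the count of entries <= max_chars is the
--     # number of trailing sentences that fit
--     n = sum(1 for t in totals if t <= max_chars)
--     return sentences[len(sentences) - n:]
-- ===== Notes on version B (the rewrite author's own statement) =====
-- stated objective: faster
-- what changed: Replaces the break-out accumulation loop that prepends each sentence via result.insert(0, ...) with a table of suffix cumulative lengths, a count of entries within budget, and a single tail slice of the input.
import Mathlib
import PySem

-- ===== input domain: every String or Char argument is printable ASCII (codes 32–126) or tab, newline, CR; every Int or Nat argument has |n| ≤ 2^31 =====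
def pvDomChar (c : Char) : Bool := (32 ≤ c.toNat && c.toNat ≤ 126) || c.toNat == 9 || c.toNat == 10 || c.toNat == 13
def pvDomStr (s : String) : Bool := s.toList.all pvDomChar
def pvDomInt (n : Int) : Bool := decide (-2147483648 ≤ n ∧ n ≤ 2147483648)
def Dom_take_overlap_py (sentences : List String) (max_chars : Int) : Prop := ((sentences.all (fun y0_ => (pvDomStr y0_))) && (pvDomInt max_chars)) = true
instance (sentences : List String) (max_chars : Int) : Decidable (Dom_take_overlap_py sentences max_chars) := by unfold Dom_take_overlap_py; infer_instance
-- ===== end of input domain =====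

-- B replaces A's break-out loop (which prepends each fitting sentence) with a table of suffix
-- cumulative lengths, a count of entries within budget, and one tail slice — alternative decomposition.

-- ===== PORT A =====
-- the for-loop over reversed(sentences) with break, state (chars, result); result.insert(0, s) = prepend
def takeOverlapLoopA (max_chars : Int) : List String → Int → List String → List String
  | [], _, result => result
  | s :: rest, chars, result =>
    if chars + PySem.Str.len s > max_chars then result
    else takeOverlapLoopA max_chars rest (chars + PySem.Str.len s) (s :: result)

def take_overlap_py (sentences : List String) (max_chars : Int) : List String :=
  takeOverlapLoopA max_chars sentences.reverse 0 []

-- ===== PORT B =====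
-- the totals-building loop of Source B: running cumulative totals of reversed(sentences) lengths
def suffixTotals : List String → Int → List Int
  | [], _ => []
  | s :: rest, t => (t + PySem.Str.len s) :: suffixTotals rest (t + PySem.Str.len s)

def take_overlap_py_alt (sentences : List String) (max_chars : Int) : List String :=
  let totals := suffixTotals sentences.reverse 0
  let n : Nat := totals.countP (fun t => decide (t ≤ max_chars))   -- sum(1 for t in totals if t <= max_chars)
  PySem.List.slice sentences (some ((sentences.length : Int) - (n : Int))) none   -- sentences[len(sentences)-n:]

-- ===== PRECONDITION & SPEC =====
def Spec_take_overlap_py (sentences : List String) (max_chars : Int) (out : List String) : Prop := out = take_overlap_py_alt sentences max_chars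
instance (sentences : List String) (max_chars : Int) (out : List String) : Decidable (Spec_take_overlap_py sentences max_chars out) := by unfold Spec_take_overlap_py; infer_instance

-- ===== CLAIM (what is proved, stated in full; the proofs are below) =====
def Claim_equal_take_overlap_py : Prop := ∀ (sentences : List String) (max_chars : Int), Dom_take_overlap_py sentences max_chars → Spec_take_overlap_py sentences max_chars (take_overlap_py sentences max_chars)

-- ===== LEMMAS AND PROOFS =====

-- number of sentences A's loop takes before breaking
def takenCount (max_chars : Int) : List String → Int → Nat
  | [], _ => 0
  | s :: rest, chars =>
    if chars + PySem.Str.len s > max_chars then 0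
    else 1 + takenCount max_chars rest (chars + PySem.Str.len s)

theorem str_len_nonneg (s : String) : 0 ≤ PySem.Str.len s := by
  simp [PySem.Str.len_eq]

theorem takeOverlapLoopA_eq (max_chars : Int) (rl : List String) :
    ∀ (chars : Int) (res : List String),
      takeOverlapLoopA max_chars rl chars res
        = (rl.take (takenCount max_chars rl chars)).reverse ++ res := by
  induction rl with
  | nil => intro chars res; simp [takeOverlapLoopA, takenCount]
  | cons s rest ih =>
    intro chars res
    by_cases h : chars + PySem.Str.len s > max_chars
    · simp only [takeOverlapLoopA, takenCount, if_pos h, List.take_zero,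
        List.reverse_nil, List.nil_append]
    · simp only [takeOverlapLoopA, takenCount, if_neg h, ih,
        Nat.add_comm 1, List.take_succ_cons, List.reverse_cons, List.append_assoc,
        List.cons_append, List.nil_append]

theorem mem_suffixTotals_le (rl : List String) :
    ∀ (c x : Int), x ∈ suffixTotals rl c → c ≤ x := by
  induction rl with
  | nil => intro c x h; simp [suffixTotals] at h
  | cons s rest ih =>
    intro c x h
    have hs := str_len_nonneg s
    simp only [suffixTotals, List.mem_cons] at h
    rcases h with h | h
    · omega
    · have := ih (c + PySem.Str.len s) x h; omega

theorem countP_suffixTotals (max_chars : Int) (rl : List String) :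
    ∀ (c : Int),
      (suffixTotals rl c).countP (fun t => decide (t ≤ max_chars))
        = takenCount max_chars rl c := by
  induction rl with
  | nil => intro c; simp [suffixTotals, takenCount]
  | cons s rest ih =>
    intro c
    by_cases h : c + PySem.Str.len s > max_chars
    · have hz : (suffixTotals rest (c + PySem.Str.len s)).countP
          (fun t => decide (t ≤ max_chars)) = 0 := by
        rw [List.countP_eq_zero]
        intro x hx
        have := mem_suffixTotals_le rest (c + PySem.Str.len s) x hx
        simp only [decide_eq_true_eq]
        omega
      simp only [suffixTotals, takenCount, List.countP_cons, if_pos h, hz,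
        decide_eq_true_eq]
      rw [if_neg (by omega)]
    · simp only [suffixTotals, takenCount, List.countP_cons, if_neg h, ih,
        decide_eq_true_eq]
      rw [if_pos (by omega)]
      omega

theorem takenCount_le_length (max_chars : Int) (rl : List String) :
    ∀ (c : Int), takenCount max_chars rl c ≤ rl.length := by
  induction rl with
  | nil => intro c; simp [takenCount]
  | cons s rest ih =>
    intro c
    by_cases h : c + PySem.Str.len s > max_chars
    · simp only [takenCount, if_pos h, List.length_cons]
      omega
    · simp only [takenCount, if_neg h, List.length_cons]
      have := ih (c + PySem.Str.len s); omega

-- ===== VERDICT (by name: the statement is the Claim_ definition above) =====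
theorem take_overlap_py_spec : Claim_equal_take_overlap_py := by
  intro sentences max_chars _
  unfold Spec_take_overlap_py take_overlap_py take_overlap_py_alt
  rw [takeOverlapLoopA_eq]
  show _ = PySem.List.slice sentences
      (some ((sentences.length : Int) -
        (((suffixTotals sentences.reverse 0).countP (fun t => decide (t ≤ max_chars)) : Nat) : Int))) none
  rw [countP_suffixTotals]
  set n := takenCount max_chars sentences.reverse 0 with hn
  have hle : n ≤ sentences.length := by
    have := takenCount_le_length max_chars sentences.reverse 0
    simpa [hn] using this
  have hnonneg : (0 : Int) ≤ (sentences.length : Int) - (n : Int) := by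
    omega
  rw [PySem.List.slice_from sentences hnonneg]
  have htn : ((sentences.length : Int) - (n : Int)).toNat = sentences.length - n := by
    omega
  rw [htn, List.append_nil, List.take_reverse, List.reverse_reverse]
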